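-- pv_equiv track=rewrite | github.com/chefkeenan/Lume | catalog/management/commands/import_pilates_csv.py | _coalesce_description
-- ===== SOURCE A (Python) =====
-- def _coalesce_description(row: dict) -> str:
--     """
--     Susun description dari kolom CSV yang relevan:
--     - key_specs kalau ada
--     - plus ringkasan brand/category/variant/marketplace/source_url
--     """
--     parts = []
--     ks = (row.get("key_specs") or "").strip()
--     if ks:
--         parts.append(ks)
--
--     # ringkas metadata jadi paragraf kedua
--     meta = []
--     if row.get("brand"):
--         meta.append(f"Brand: {row.get('brand')}")
--     if row.get("category"):
--         meta.append(f"Kategori: {row.get('category')}")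
--     if row.get("variant"):
--         meta.append(f"Varian: {row.get('variant')}")
--     if row.get("marketplace"):
--         meta.append(f"Marketplace: {row.get('marketplace')}")
--     if row.get("source_url"):
--         meta.append(f"Sumber: {row.get('source_url')}")
--     if meta:
--         parts.append(" | ".join(meta))
--
--     desc = "\n\n".join([p for p in parts if p])
--     return desc or (row.get("product_name") or "").strip()
-- ===== SOURCE B (Python) =====
-- # B: builds the description by direct recursive string concatenation (no lists, no join()).
-- def _coalesce_description(row: dict) -> str:
--     def meta_str(fields):
--         if not fields:
--             return ""
--         key, label = fields[0]
--         v = row.get(key)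
--         tail = meta_str(fields[1:])
--         if not v:
--             return tail
--         head = f"{label}: {v}"
--         return head + " | " + tail if tail else head
--
--     meta = meta_str([("brand", "Brand"), ("category", "Kategori"),
--                      ("variant", "Varian"), ("marketplace", "Marketplace"),
--                      ("source_url", "Sumber")])
--     ks = (row.get("key_specs") or "").strip()
--     if ks and meta:
--         desc = ks + "\n\n" + meta
--     else:
--         desc = ks or meta
--     return desc or (row.get("product_name") or "").strip()
-- ===== Notes on version B (the rewrite author's own statement) =====
-- stated objective: alternative
-- what changed: The list-accumulating if/append branches plus ' | '.join and '\n\n'.join of A are replaced by one recursive helper that builds the metadata string directly by conditional concatenation and an explicit two-branch merge with key_specs; no intermediate lists or join() at all.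
import Mathlib
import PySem

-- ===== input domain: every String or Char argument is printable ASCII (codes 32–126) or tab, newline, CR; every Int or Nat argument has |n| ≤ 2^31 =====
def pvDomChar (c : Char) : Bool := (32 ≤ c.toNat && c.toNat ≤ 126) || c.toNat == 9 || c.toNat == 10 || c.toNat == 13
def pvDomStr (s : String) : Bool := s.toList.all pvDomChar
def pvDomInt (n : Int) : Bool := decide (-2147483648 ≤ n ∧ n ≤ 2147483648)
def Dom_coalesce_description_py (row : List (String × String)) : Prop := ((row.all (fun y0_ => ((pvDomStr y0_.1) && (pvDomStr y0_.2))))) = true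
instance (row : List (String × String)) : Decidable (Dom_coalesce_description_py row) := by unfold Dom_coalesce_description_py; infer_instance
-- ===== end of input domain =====

-- B builds the metadata string by recursive conditional concatenation instead of
-- A's list-accumulating branches plus two join() passes (objective: alternative).

-- shared helper: Python's `row.get(k)` on a str->str dict (association list, first
-- match), with missing/None collapsed to ""; both are falsy and A/B only use the
-- value when truthy or through `or ""`, so this total lookup is exact.
def pvGet (row : List (String × String)) (k : String) : String :=
  ((row.find? (fun p => p.1 == k)).map (·.2)).getD ""

-- ===== PORT A =====
def coalesce_description_py (row : List (String × String)) : String :=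
  let ks := PySem.Str.strip (pvGet row "key_specs")
  let parts : List String := if ks ≠ "" then [ks] else []
  let m : List String := []
  let m := if pvGet row "brand" ≠ "" then m ++ ["Brand: " ++ pvGet row "brand"] else m
  let m := if pvGet row "category" ≠ "" then m ++ ["Kategori: " ++ pvGet row "category"] else m
  let m := if pvGet row "variant" ≠ "" then m ++ ["Varian: " ++ pvGet row "variant"] else m
  let m := if pvGet row "marketplace" ≠ "" then m ++ ["Marketplace: " ++ pvGet row "marketplace"] else m
  let m := if pvGet row "source_url" ≠ "" then m ++ ["Sumber: " ++ pvGet row "source_url"] else m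
  let parts := if m ≠ [] then parts ++ [PySem.Str.join " | " m] else parts
  let desc := PySem.Str.join "\n\n" (parts.filter (fun p => p ≠ ""))
  if desc ≠ "" then desc else PySem.Str.strip (pvGet row "product_name")

-- ===== PORT B =====
def pvMetaStr (row : List (String × String)) : List (String × String) → String
  | [] => ""
  | (key, label) :: rest =>
    let v := pvGet row key
    let tail := pvMetaStr row rest
    if v = "" then tail
    else
      let head := label ++ ": " ++ v
      if tail ≠ "" then head ++ " | " ++ tail else head

def coalesce_description_py_alt (row : List (String × String)) : String :=
  let metaS := pvMetaStr row
    [("brand", "Brand"), ("category", "Kategori"), ("variant", "Varian"),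
     ("marketplace", "Marketplace"), ("source_url", "Sumber")]
  let ks := PySem.Str.strip (pvGet row "key_specs")
  let desc :=
    if ks ≠ "" ∧ metaS ≠ "" then ks ++ "\n\n" ++ metaS
    else if ks ≠ "" then ks else metaS
  if desc ≠ "" then desc else PySem.Str.strip (pvGet row "product_name")

-- ===== PRECONDITION & SPEC =====
def Spec_coalesce_description_py (row : List (String × String)) (out : String) : Prop := out = coalesce_description_py_alt row
instance (row : List (String × String)) (out : String) : Decidable (Spec_coalesce_description_py row out) := by unfold Spec_coalesce_description_py; infer_instance

-- ===== CLAIM (what is proved, stated in full; the proofs are below) =====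
def Claim_equal_coalesce_description_py : Prop := ∀ (row : List (String × String)), Dom_coalesce_description_py row → Spec_coalesce_description_py row (coalesce_description_py row)

-- ===== LEMMAS AND PROOFS =====
-- (the whole equivalence is proved at the level of char lists via String.toList_inj)
lemma pvStripNil (s : String) : PySem.Chars.strip s.toList = [] ↔ PySem.Str.strip s = "" := by
  rw [← String.toList_eq_nil_iff]; simp

-- ===== VERDICT (by name: the statement is the Claim_ definition above) =====
theorem coalesce_description_py_spec : Claim_equal_coalesce_description_py := by
  intro row _
  unfold Spec_coalesce_description_py coalesce_description_py coalesce_description_py_alt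
  rw [← String.toList_inj]
  by_cases h1 : pvGet row "brand" = "" <;>
  by_cases h2 : pvGet row "category" = "" <;>
  by_cases h3 : pvGet row "variant" = "" <;>
  by_cases h4 : pvGet row "marketplace" = "" <;>
  by_cases h5 : pvGet row "source_url" = "" <;>
  by_cases hks : PySem.Str.strip (pvGet row "key_specs") = "" <;>
  simp [h1, h2, h3, h4, h5, hks, pvMetaStr, List.filter, PySem.Str.join,
        PySem.Chars.join, List.intercalate, List.intersperse, pvStripNil]
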